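-- pv_equiv track=rewrite | github.com/likemilktea/baekJoonCode | 프로그래머스/unrated/181890. 왼쪽 오른쪽/왼쪽 오른쪽.py | solution
-- ===== SOURCE A (Python) =====
-- def solution(str_list):
--     answer = []
--
--     for i in range(len(str_list)): # str_list 순회
--         if str_list[i] == 'l': # 만약 l이 나온다면
--             answer=str_list[:i] # l의 왼쪽 문자열 슬라이싱으로 할당
--             return answer
--
--         elif str_list[i] == 'r': # 만약 r이 나온다면
--             answer=str_list[i+1:] # r의 오른쪽 문자열 슬라이싱으로 할당
--             return answer
--     return answer
-- ===== SOURCE B (Python) =====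
-- def solution(str_list):
--     li = str_list.index('l') if 'l' in str_list else None
--     ri = str_list.index('r') if 'r' in str_list else None
--     if li is None:
--         return [] if ri is None else str_list[ri+1:]
--     if ri is None or li < ri:
--         return str_list[:li]
--     return str_list[ri+1:]
-- ===== Notes on version B (the rewrite author's own statement) =====
-- stated objective: alternative
-- what changed: Replaced the single index-scanning loop with branch-per-element early returns by locating the first 'l' and first 'r' independently via list.index and then comparing the two positions to pick the slice.
import Mathlib
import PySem

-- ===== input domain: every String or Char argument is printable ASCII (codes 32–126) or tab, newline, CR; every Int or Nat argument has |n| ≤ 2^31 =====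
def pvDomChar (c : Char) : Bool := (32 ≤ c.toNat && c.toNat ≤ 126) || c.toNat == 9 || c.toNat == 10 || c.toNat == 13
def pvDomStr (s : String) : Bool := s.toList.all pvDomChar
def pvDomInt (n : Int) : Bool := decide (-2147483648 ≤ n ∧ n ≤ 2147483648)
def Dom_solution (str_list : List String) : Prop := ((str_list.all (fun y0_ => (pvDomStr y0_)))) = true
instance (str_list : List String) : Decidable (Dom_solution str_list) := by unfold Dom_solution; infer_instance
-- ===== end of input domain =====

-- B locates the first 'l' and first 'r' independently and compares their positions, instead of A's single scanning loop; same cost, different decomposition.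

-- ===== PORT A =====
-- the Python for-loop over range(len(str_list)) with early returns, as structural
-- recursion over the suffix still to scan, carrying the current index i
def solutionAux (orig : List String) : List String → Int → List String
  | [], _ => []
  | x :: rest, i =>
    if x = "l" then PySem.List.slice orig none (some i)
    else if x = "r" then PySem.List.slice orig (some (i + 1)) none
    else solutionAux orig rest (i + 1)

def solution (str_list : List String) : List String :=
  solutionAux str_list str_list 0

-- ===== PORT B =====
def solution_alt (str_list : List String) : List String :=
  let li := PySem.List.index? str_list "l"
  let ri := PySem.List.index? str_list "r"
  match li, ri with
  | none, none => []
  | none, some r => PySem.List.slice str_list (some ((r : Int) + 1)) none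
  | some l, none => PySem.List.slice str_list none (some (l : Int))
  | some l, some r =>
    if l < r then PySem.List.slice str_list none (some (l : Int))
    else PySem.List.slice str_list (some ((r : Int) + 1)) none

-- ===== PRECONDITION & SPEC =====
def Spec_solution (str_list : List String) (out : List String) : Prop := out = solution_alt str_list
instance (str_list : List String) (out : List String) : Decidable (Spec_solution str_list out) := by unfold Spec_solution; infer_instance

-- ===== CLAIM (what is proved, stated in full; the proofs are below) =====
def Claim_equal_solution : Prop := ∀ (str_list : List String), Dom_solution str_list → Spec_solution str_list (solution str_list)

-- ===== LEMMAS AND PROOFS =====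

lemma solutionAux_eq (orig : List String) :
    ∀ (xs : List String) (i : Nat),
      solutionAux orig xs (i : Int) =
        match PySem.List.index? xs "l", PySem.List.index? xs "r" with
        | none, none => []
        | none, some r => PySem.List.slice orig (some (((i + r : Nat) : Int) + 1)) none
        | some l, none => PySem.List.slice orig none (some ((i + l : Nat) : Int))
        | some l, some r =>
          if l < r then PySem.List.slice orig none (some ((i + l : Nat) : Int))
          else PySem.List.slice orig (some (((i + r : Nat) : Int) + 1)) none := by
  intro xs
  induction xs with
  | nil => intro i; simp [solutionAux, PySem.List.index?]
  | cons x rest ih =>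
    intro i
    by_cases hl : x = "l"
    · subst hl
      have h1 : PySem.List.index? ("l" :: rest) "l" = some 0 :=
        PySem.List.index?_cons_self _ _
      have h2 : PySem.List.index? ("l" :: rest) "r" =
          (PySem.List.index? rest "r").map (· + 1) :=
        PySem.List.index?_cons_of_ne _ (by decide)
      rw [solutionAux, if_pos rfl, h1, h2]
      cases PySem.List.index? rest "r" with
      | none => simp
      | some r => simp
    · by_cases hr : x = "r"
      · subst hr
        have h1 : PySem.List.index? ("r" :: rest) "l" =
            (PySem.List.index? rest "l").map (· + 1) :=
          PySem.List.index?_cons_of_ne _ (by decide)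
        have h2 : PySem.List.index? ("r" :: rest) "r" = some 0 :=
          PySem.List.index?_cons_self _ _
        rw [solutionAux, if_neg (by decide : ¬("r" = "l")), if_pos rfl, h1, h2]
        cases PySem.List.index? rest "l" with
        | none => simp
        | some l => simp
      · have h1 : PySem.List.index? (x :: rest) "l" =
            (PySem.List.index? rest "l").map (· + 1) :=
          PySem.List.index?_cons_of_ne _ hl
        have h2 : PySem.List.index? (x :: rest) "r" =
            (PySem.List.index? rest "r").map (· + 1) :=
          PySem.List.index?_cons_of_ne _ hr
        rw [solutionAux, if_neg hl, if_neg hr, h1, h2]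
        have : ((i : Int) + 1) = ((i + 1 : Nat) : Int) := by push_cast; ring
        rw [this, ih (i + 1)]
        cases PySem.List.index? rest "l" with
        | none =>
          cases PySem.List.index? rest "r" with
          | none => rfl
          | some r =>
            simp only [Option.map_some]
            congr 2
            push_cast; ring
        | some l =>
          cases PySem.List.index? rest "r" with
          | none =>
            simp only [Option.map_some]
            congr 2
            push_cast; ring
          | some r =>
            simp only [Option.map_some]
            by_cases hlr : l < r
            · rw [if_pos hlr, if_pos (show l + 1 < r + 1 by omega)]
              congr 2; omega
            · rw [if_neg hlr, if_neg (show ¬ l + 1 < r + 1 by omega)]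
              congr 3; omega

-- ===== VERDICT (by name: the statement is the Claim_ definition above) =====
theorem solution_spec : Claim_equal_solution := by
  intro xs _
  unfold Spec_solution solution solution_alt
  have h := solutionAux_eq xs xs 0
  simp only [Nat.cast_zero, Nat.zero_add] at h
  exact h
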